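-- pv_equiv track=rewrite | github.com/sumit-kumar12/phising | src/utils.py | subdomain_suspicion
-- ===== SOURCE A (Python) =====
-- def levenshtein(a, b):
--     # pure python Levenshtein distance
--     if a == b:
--         return 0
--     la, lb = len(a), len(b)
--     if la == 0:
--         return lb
--     if lb == 0:
--         return la
--     # initialize matrix
--     prev = list(range(lb + 1))
--     for i, ca in enumerate(a, start=1):
--         curr = [i] + [0] * lb
--         for j, cb in enumerate(b, start=1):
--             cost = 0 if ca == cb else 1
--             curr[j] = min(prev[j] + 1,      # deletion
--                           curr[j-1] + 1,    # insertion
--                           prev[j-1] + cost) # substitution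
--         prev = curr
--     return prev[lb]
--
-- def subdomain_suspicion(subdomains, trusted_domains):
--     """
--     Check if subdomains contain suspicious patterns or mimic trusted domains.
--     """
--     reasons = []
--     if not subdomains:
--         return reasons
--     for sub in subdomains:
--         # Check for excessive length or numbers
--         if len(sub) > 50 or sum(c.isdigit() for c in sub) > 5:
--             reasons.append(f'Suspicious subdomain: {sub} (too long or many numbers)')
--         # Check edit distance to trusted
--         for td in trusted_domains:
--             if levenshtein(sub, td) <= 2:
--                 reasons.append(f'Subdomain {sub} closely resembles trusted {td}')
--     return reasons
-- ===== SOURCE B (Python) =====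
-- def _within2(a, b, la, lb, k):
--     # Is the edit distance between a[:la] and b[:lb] at most k?
--     # Strip the common suffix, prune on length difference, then branch on the
--     # last characters with a decremented budget (threshold-bounded search).
--     while la > 0 and lb > 0 and a[la - 1] == b[lb - 1]:
--         la -= 1
--         lb -= 1
--     if abs(la - lb) > k:
--         return False
--     if la == 0:
--         return lb <= k
--     if lb == 0:
--         return la <= k
--     if k == 0:
--         return False
--     return (_within2(a, b, la - 1, lb - 1, k - 1)
--             or _within2(a, b, la - 1, lb, k - 1)
--             or _within2(a, b, la, lb - 1, k - 1))
--
-- def subdomain_suspicion(subdomains, trusted_domains):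
--     """
--     Check if subdomains contain suspicious patterns or mimic trusted domains.
--     """
--     reasons = []
--     for sub in subdomains:
--         if len(sub) > 50 or sum(c.isdigit() for c in sub) > 5:
--             reasons.append(f'Suspicious subdomain: {sub} (too long or many numbers)')
--         for td in trusted_domains:
--             if _within2(sub, td, len(sub), len(td), 2):
--                 reasons.append(f'Subdomain {sub} closely resembles trusted {td}')
--     return reasons
-- ===== Notes on version B (the rewrite author's own statement) =====
-- stated objective: faster
-- what changed: Replaces the full O(m*n) Levenshtein DP matrix per pair with a threshold-bounded (k=2) recursive check that strips the common suffix and prunes on length difference, deciding distance<=2 in O(n + 3^k) per pair.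
import Mathlib
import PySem

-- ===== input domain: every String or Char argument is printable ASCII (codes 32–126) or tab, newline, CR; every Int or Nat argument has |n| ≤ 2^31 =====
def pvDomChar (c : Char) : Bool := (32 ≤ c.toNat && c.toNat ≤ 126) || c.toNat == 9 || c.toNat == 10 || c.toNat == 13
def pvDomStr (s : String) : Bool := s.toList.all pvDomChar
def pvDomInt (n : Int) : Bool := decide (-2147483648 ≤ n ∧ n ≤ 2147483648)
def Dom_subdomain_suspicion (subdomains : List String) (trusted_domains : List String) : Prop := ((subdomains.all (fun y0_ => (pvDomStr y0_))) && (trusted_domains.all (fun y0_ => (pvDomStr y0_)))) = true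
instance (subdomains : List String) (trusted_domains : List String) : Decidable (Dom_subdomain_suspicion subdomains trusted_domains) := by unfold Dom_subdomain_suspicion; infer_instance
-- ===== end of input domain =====

-- B replaces A's full Levenshtein DP matrix per (subdomain, trusted) pair by a
-- threshold-bounded (k = 2) recursive distance check with common-suffix stripping
-- and a length-difference prune; objective: faster (measured).

-- ===== PORT A =====
-- literal port of A's `levenshtein` (row-by-row DP matrix)
def levA (a b : List Char) : Int :=
  if a = b then 0
  else
    let la := a.length
    let lb := b.length
    if la = 0 then (lb : Int)
    else if lb = 0 then (la : Int)
    else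
      let prev0 : List Int := (List.range (lb + 1)).map (fun (n : Nat) => (n : Int))
      let last := a.zipIdx.foldl (fun prev p =>
        let ca := p.1
        let i : Nat := p.2 + 1
        let curr0 : List Int := (i : Int) :: List.replicate lb 0
        b.zipIdx.foldl (fun curr q =>
          let cb := q.1
          let j : Nat := q.2 + 1
          let cost : Int := if ca = cb then 0 else 1
          curr.set j (min (min (prev.getD j 0 + 1) (curr.getD (j-1) 0 + 1)) (prev.getD (j-1) 0 + cost)))
          curr0) prev0
      last.getD lb 0

def subdomain_suspicion (subdomains : List String) (trusted_domains : List String) : List String :=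
  let reasons : List String := []
  if subdomains = [] then reasons
  else
    subdomains.foldl (fun reasons sub =>
      let reasons :=
        if 50 < sub.toList.length ∨ 5 < sub.toList.countP (fun c => PySem.Chars.isdigit c)
        then reasons ++ ["Suspicious subdomain: " ++ sub ++ " (too long or many numbers)"]
        else reasons
      trusted_domains.foldl (fun reasons td =>
        if levA sub.toList td.toList ≤ 2
        then reasons ++ ["Subdomain " ++ sub ++ " closely resembles trusted " ++ td]
        else reasons) reasons) reasons

-- ===== PORT B =====
-- Python's `_within2` peels characters from the RIGHT end of a[:la], b[:lb]; the
-- port works on the REVERSED character lists, so the last Python character is the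
-- list head: the while-loop stripping the common suffix is `stripCommon`.
def stripCommon : List Char → List Char → List Char × List Char
  | x :: a, y :: b => if x = y then stripCommon a b else (x :: a, y :: b)
  | a, b => (a, b)

def within2 (k : Nat) (ra rb : List Char) : Bool :=
  let p := stripCommon ra rb
  if ((p.1.length : Int) - (p.2.length : Int)).natAbs > k then false
  else
    match p.1, p.2 with
    | [], b => decide (b.length ≤ k)
    | a, [] => decide (a.length ≤ k)
    | x :: a', y :: b' =>
      match k with
      | 0 => false
      | Nat.succ k' =>
        within2 k' a' b' || within2 k' a' (y :: b') || within2 k' (x :: a') b'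

def subdomain_suspicion_alt (subdomains : List String) (trusted_domains : List String) : List String :=
  subdomains.foldl (fun reasons sub =>
    let reasons :=
      if 50 < sub.toList.length ∨ 5 < sub.toList.countP (fun c => PySem.Chars.isdigit c)
      then reasons ++ ["Suspicious subdomain: " ++ sub ++ " (too long or many numbers)"]
      else reasons
    trusted_domains.foldl (fun reasons td =>
      if within2 2 sub.toList.reverse td.toList.reverse = true
      then reasons ++ ["Subdomain " ++ sub ++ " closely resembles trusted " ++ td]
      else reasons) reasons) []

-- ===== PRECONDITION & SPEC =====
def Spec_subdomain_suspicion (subdomains : List String) (trusted_domains : List String) (out : List String) : Prop := out = subdomain_suspicion_alt subdomains trusted_domains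
instance (subdomains : List String) (trusted_domains : List String) (out : List String) : Decidable (Spec_subdomain_suspicion subdomains trusted_domains out) := by unfold Spec_subdomain_suspicion; infer_instance

-- ===== CLAIM (what is proved, stated in full; the proofs are below) =====
def Claim_equal_subdomain_suspicion : Prop := ∀ (subdomains : List String) (trusted_domains : List String), Dom_subdomain_suspicion subdomains trusted_domains → Spec_subdomain_suspicion subdomains trusted_domains (subdomain_suspicion subdomains trusted_domains)


-- ===== LEMMAS AND PROOFS =====

-- mathematical Levenshtein distance (front-recursion); both ports are reduced to it
def lev : List Char → List Char → Nat
  | [], b => b.length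
  | a, [] => a.length
  | x :: a, y :: b =>
      min (min (lev a (y :: b) + 1) (lev (x :: a) b + 1)) (lev a b + (if x = y then 0 else 1))
termination_by a b => a.length + b.length

lemma lev_nil_left (b : List Char) : lev [] b = b.length := by
  cases b <;> simp [lev]

lemma lev_nil_right (a : List Char) : lev a [] = a.length := by
  cases a <;> simp [lev]

-- edit distance dominates the length difference
lemma lev_ge_diff : ∀ (n : Nat) (a b : List Char), a.length + b.length ≤ n →
    ((a.length : Int) - b.length).natAbs ≤ lev a b := by
  intro n
  induction n with
  | zero =>
    intro a b h
    cases a with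
    | cons z a => simp at h
    | nil =>
      cases b with
      | cons w b => simp at h
      | nil => simp [lev_nil_left]
  | succ n ih =>
    intro a b h
    match a, b with
    | [], b => simp [lev_nil_left]
    | x :: a, [] => simp [lev_nil_right]; omega
    | x :: a, y :: b =>
      have h1 := ih a (y :: b) (by simp at h ⊢; omega)
      have h2 := ih (x :: a) b (by simp at h ⊢; omega)
      have h3 := ih a b (by simp at h ⊢; omega)
      simp only [lev, List.length_cons] at *
      split_ifs at * <;> omega

-- inserting one character changes the distance by at most one
lemma lev_le_cons : ∀ (n : Nat) (a b : List Char), a.length + b.length ≤ n →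
    (∀ y, lev a b ≤ lev a (y :: b) + 1) ∧ (∀ x, lev a b ≤ lev (x :: a) b + 1) := by
  intro n
  induction n with
  | zero =>
    intro a b h
    cases a with
    | cons z a => simp at h
    | nil =>
      cases b with
      | cons w b => simp at h
      | nil => simp [lev_nil_left, lev_nil_right]
  | succ n ih =>
    intro a b h
    constructor
    · intro y
      match a, b with
      | [], b => simp [lev_nil_left]; omega
      | x :: a, [] =>
        have hd := lev_ge_diff ((x :: a).length + [y].length) (x :: a) [y] le_rfl
        simp [lev_nil_right] at hd ⊢
        omega
      | x :: a, z :: b =>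
        have hmin : lev (x :: a) (z :: b) ≤ lev a (z :: b) + 1 := by
          simp only [lev]; split_ifs <;> omega
        have hih := (ih a (z :: b) (by simp at h ⊢; omega)).1 y
        conv_rhs => rw [lev]
        split_ifs <;> omega
    · intro x
      match a, b with
      | a, [] => simp [lev_nil_right]; omega
      | [], y :: b =>
        have hd := lev_ge_diff ([x].length + (y :: b).length) [x] (y :: b) le_rfl
        simp [lev_nil_left] at hd ⊢
        omega
      | z :: a, y :: b =>
        have hmin : lev (z :: a) (y :: b) ≤ lev (z :: a) b + 1 := by
          simp only [lev]; split_ifs <;> omega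
        have hih := (ih (z :: a) b (by simp at h ⊢; omega)).2 x
        conv_rhs => rw [lev]
        split_ifs <;> omega

lemma lev_le_cons_right (a b : List Char) (y : Char) : lev a b ≤ lev a (y :: b) + 1 :=
  (lev_le_cons (a.length + b.length) a b le_rfl).1 y

lemma lev_le_cons_left (a b : List Char) (x : Char) : lev a b ≤ lev (x :: a) b + 1 :=
  (lev_le_cons (a.length + b.length) a b le_rfl).2 x

lemma lev_cons_same (x : Char) (a b : List Char) : lev (x :: a) (x :: b) = lev a b := by
  have h1 := lev_le_cons_right a b x
  have h2 := lev_le_cons_left a b x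
  simp [lev]
  omega

lemma lev_self (a : List Char) : lev a a = 0 := by
  induction a with
  | nil => simp [lev_nil_left]
  | cons x a ih => rw [lev_cons_same]; exact ih

lemma lev_mismatch (x y : Char) (a b : List Char) (h : x ≠ y) :
    lev (x :: a) (y :: b) = min (min (lev a (y :: b) + 1) (lev (x :: a) b + 1)) (lev a b + 1) := by
  simp only [lev, if_neg h]

-- stripping the common prefix preserves the distance
lemma stripCommon_lev : ∀ (a b : List Char), lev (stripCommon a b).1 (stripCommon a b).2 = lev a b := by
  intro a
  induction a with
  | nil => intro b; cases b <;> simp [stripCommon]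
  | cons x a ih =>
    intro b
    cases b with
    | nil => simp [stripCommon]
    | cons y b =>
      by_cases hxy : x = y
      · subst hxy
        rw [lev_cons_same, ← ih b]
        simp [stripCommon]
      · simp [stripCommon, hxy]

lemma stripCommon_head : ∀ (a b : List Char) (x : Char) (a' : List Char) (y : Char) (b' : List Char),
    stripCommon a b = (x :: a', y :: b') → x ≠ y := by
  intro a
  induction a with
  | nil =>
    intro b x a' y b' h
    cases b <;> simp [stripCommon] at h
  | cons z a ih =>
    intro b x a' y b' h
    cases b with
    | nil => simp [stripCommon] at h
    | cons w b =>
      by_cases hzw : z = w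
      · subst hzw
        simp only [stripCommon] at h
        exact ih b x a' y b' h
      · simp only [stripCommon, if_neg hzw, Prod.mk.injEq, List.cons.injEq] at h
        obtain ⟨⟨rfl, -⟩, rfl, -⟩ := h
        exact hzw

-- the threshold-bounded search decides `lev ≤ k` exactly
lemma within2_eq : ∀ (k : Nat) (a b : List Char), within2 k a b = decide (lev a b ≤ k) := by
  intro k
  induction k with
  | zero =>
    intro a b
    rw [show lev a b = lev (stripCommon a b).1 (stripCommon a b).2 from (stripCommon_lev a b).symm,
       within2]
    rcases hp : stripCommon a b with ⟨u, v⟩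
    match u, v with
    | [], v =>
      dsimp only
      simp only [lev_nil_left, List.length_nil, Nat.cast_zero]
      split_ifs with h
      · symm; rw [decide_eq_false_iff_not]; omega
      · rfl
    | x :: u, [] =>
      dsimp only
      simp only [lev_nil_right, List.length_cons, List.length_nil, Nat.cast_zero]
      split_ifs with h
      · symm; rw [decide_eq_false_iff_not]; push_cast at h; omega
      · rfl
    | x :: u, y :: v =>
      have hxy : x ≠ y := stripCommon_head a b x u y v hp
      have hpos : 1 ≤ lev (x :: u) (y :: v) := by
        rw [lev_mismatch x y u v hxy]; omega
      dsimp only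
      split_ifs with h <;> symm <;> rw [decide_eq_false_iff_not] <;> omega
  | succ k' ih =>
    intro a b
    rw [show lev a b = lev (stripCommon a b).1 (stripCommon a b).2 from (stripCommon_lev a b).symm,
       within2]
    rcases hp : stripCommon a b with ⟨u, v⟩
    match u, v with
    | [], v =>
      dsimp only
      simp only [lev_nil_left, List.length_nil, Nat.cast_zero]
      split_ifs with h
      · symm; rw [decide_eq_false_iff_not]; omega
      · rfl
    | x :: u, [] =>
      dsimp only
      simp only [lev_nil_right, List.length_cons, List.length_nil, Nat.cast_zero]
      split_ifs with h
      · symm; rw [decide_eq_false_iff_not]; push_cast at h; omega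
      · rfl
    | x :: u, y :: v =>
      have hxy : x ≠ y := stripCommon_head a b x u y v hp
      have hd := lev_ge_diff ((x :: u).length + (y :: v).length) (x :: u) (y :: v) le_rfl
      dsimp only
      rw [lev_mismatch x y u v hxy] at hd ⊢
      split_ifs with h
      · symm; rw [decide_eq_false_iff_not]
        simp only [List.length_cons] at h hd
        push_cast at h
        omega
      · rw [ih u v, ih u (y :: v), ih (x :: u) v]
        simp only [← Bool.decide_or]
        rw [decide_eq_decide]
        omega

-- ===== DP (port A) correctness =====
-- `Drow a b i j` = the DP matrix entry: distance between the reversed prefixes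
def Drow (a b : List Char) (i j : Nat) : Nat := lev ((a.take i).reverse) ((b.take j).reverse)

lemma Drow_zero_left (a b : List Char) (j : Nat) : Drow a b 0 j = min j b.length := by
  simp [Drow, lev_nil_left]

lemma Drow_zero_right (a b : List Char) (i : Nat) : Drow a b i 0 = min i a.length := by
  simp [Drow, lev_nil_right]

lemma Drow_rec (a b : List Char) (i j : Nat) (hi : i < a.length) (hj : j < b.length) :
    Drow a b (i+1) (j+1) =
      min (min (Drow a b i (j+1) + 1) (Drow a b (i+1) j + 1))
          (Drow a b i j + (if a[i] = b[j] then 0 else 1)) := by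
  unfold Drow
  rw [List.take_add_one, List.take_add_one (l := b)]
  simp only [List.getElem?_eq_getElem hi, List.getElem?_eq_getElem hj, Option.toList_some,
    List.reverse_append, List.reverse_singleton, List.singleton_append]
  rw [lev]

def rowL (a b : List Char) (i : Nat) : List Int :=
  (List.range (b.length + 1)).map (fun j => (Drow a b i j : Int))

def mixRow (a b : List Char) (i t : Nat) : List Int :=
  (List.range (b.length + 1)).map (fun j => if j ≤ t then (Drow a b i j : Int) else 0)

lemma set_map_range (n : Nat) (f : Nat → Int) (j : Nat) (v : Int) :
    ((List.range n).map f).set j v = (List.range n).map (fun x => if x = j then v else f x) := by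
  apply List.ext_getElem
  · simp
  · intro x hx hx2
    simp only [List.getElem_set, List.getElem_map, List.getElem_range]
    split_ifs with h1 h2
    · rfl
    · exact absurd h1.symm h2
    · exact absurd ‹x = j›.symm h1
    · rfl

lemma inner_fold (a b : List Char) (i' : Nat) (hi : i' < a.length) :
    ∀ (d t : Nat), t + d = b.length →
    (((b.drop t).zipIdx t).foldl (fun (curr : List Int) (q : Char × Nat) =>
        curr.set (q.2+1) (min (min ((rowL a b i').getD (q.2+1) 0 + 1) (curr.getD (q.2+1-1) 0 + 1))
          ((rowL a b i').getD (q.2+1-1) 0 + (if a[i'] = q.1 then 0 else 1))))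
      (mixRow a b (i'+1) t)) = rowL a b (i'+1) := by
  intro d
  induction d with
  | zero =>
    intro t ht
    have : t = b.length := by omega
    subst this
    rw [List.drop_length]
    simp only [List.zipIdx_nil, List.foldl_nil]
    unfold mixRow rowL
    apply List.map_congr_left
    intro j hj
    rw [if_pos (by simp at hj; omega)]
  | succ d ih =>
    intro t ht
    have htlt : t < b.length := by omega
    rw [List.drop_eq_getElem_cons htlt, List.zipIdx_cons, List.foldl_cons]
    have hstep : (mixRow a b (i'+1) t).set (t+1)
        (min (min ((rowL a b i').getD (t+1) 0 + 1) ((mixRow a b (i'+1) t).getD (t+1-1) 0 + 1))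
          ((rowL a b i').getD (t+1-1) 0 + (if a[i'] = b[t] then 0 else 1)))
        = mixRow a b (i'+1) (t+1) := by
      have g1 : (rowL a b i').getD (t+1) 0 = (Drow a b i' (t+1) : Int) :=
        PySem.List.getD_map_range _ _ _ _ (by omega)
      have g2 : (mixRow a b (i'+1) t).getD (t+1-1) 0 = (Drow a b (i'+1) t : Int) := by
        unfold mixRow
        rw [show t+1-1 = t from rfl, PySem.List.getD_map_range _ _ _ _ (by omega), if_pos le_rfl]
      have g3 : (rowL a b i').getD (t+1-1) 0 = (Drow a b i' t : Int) := by
        unfold rowL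
        rw [show t+1-1 = t from rfl, PySem.List.getD_map_range _ _ _ _ (by omega)]
      rw [g1, g2, g3]
      have hval : min (min ((Drow a b i' (t+1) : Int) + 1) ((Drow a b (i'+1) t : Int) + 1))
          ((Drow a b i' t : Int) + (if a[i'] = b[t] then 0 else 1))
          = (Drow a b (i'+1) (t+1) : Int) := by
        rw [Drow_rec a b i' t hi htlt]
        push_cast
        split_ifs <;> ring_nf
      rw [hval]
      unfold mixRow
      rw [set_map_range]
      apply List.map_congr_left
      intro j hj
      by_cases hjt : j = t+1
      · subst hjt; simp
      · rw [if_neg hjt]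
        by_cases hle : j ≤ t
        · rw [if_pos hle, if_pos (by omega)]
        · rw [if_neg hle, if_neg (by omega)]
    rw [hstep]
    exact ih (t+1) (by omega)

lemma outer_fold (a b : List Char) :
    ∀ (d t : Nat), t + d = a.length →
    (((a.drop t).zipIdx t).foldl (fun (prev : List Int) (p : Char × Nat) =>
        b.zipIdx.foldl (fun (curr : List Int) (q : Char × Nat) =>
          curr.set (q.2+1) (min (min (prev.getD (q.2+1) 0 + 1) (curr.getD (q.2+1-1) 0 + 1))
            (prev.getD (q.2+1-1) 0 + (if p.1 = q.1 then 0 else 1))))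
          (((p.2+1 : Nat) : Int) :: List.replicate b.length 0))
      (rowL a b t)) = rowL a b a.length := by
  intro d
  induction d with
  | zero =>
    intro t ht
    have : t = a.length := by omega
    subst this
    rw [List.drop_length]
    simp
  | succ d ih =>
    intro t ht
    have htlt : t < a.length := by omega
    rw [List.drop_eq_getElem_cons htlt, List.zipIdx_cons, List.foldl_cons]
    have hstart : mixRow a b (t+1) 0 = ((t+1 : Nat) : Int) :: List.replicate b.length 0 := by
      unfold mixRow
      rw [List.range_succ_eq_map, List.map_cons]
      congr 1
      · rw [if_pos le_rfl, Drow_zero_right, min_eq_left (by omega)]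
      · rw [List.map_map]
        rw [show (List.replicate b.length (0:Int)) = (List.range b.length).map (fun _ => (0:Int)) by
          simp [List.map_const']]
        apply List.map_congr_left
        intro j hj
        simp
    have hstep := inner_fold a b t htlt b.length 0 (by omega)
    rw [List.drop_zero] at hstep
    rw [← hstart]
    rw [show (b.zipIdx.foldl (fun (curr : List Int) (q : Char × Nat) =>
          curr.set (q.2+1) (min (min ((rowL a b t).getD (q.2+1) 0 + 1) (curr.getD (q.2+1-1) 0 + 1))
            ((rowL a b t).getD (q.2+1-1) 0 + (if a[t] = q.1 then 0 else 1))))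
          (mixRow a b (t+1) 0)) = rowL a b (t+1) from hstep]
    exact ih (t+1) (by omega)

lemma levA_eq (a b : List Char) : levA a b = (lev a.reverse b.reverse : Nat) := by
  unfold levA
  simp only []
  split_ifs with hab ha hb
  · subst hab
    rw [lev_self]
    simp
  · rw [List.length_eq_zero_iff] at ha
    subst ha
    rw [List.reverse_nil, lev_nil_left]
    simp
  · rw [List.length_eq_zero_iff] at hb
    subst hb
    rw [List.reverse_nil, lev_nil_right]
    simp
  · have hprev0 : (List.range (b.length + 1)).map (fun (n : Nat) => (n : Int)) = rowL a b 0 := by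
      unfold rowL
      apply List.map_congr_left
      intro j hj
      rw [Drow_zero_left, min_eq_left (by simp at hj; omega)]
    have houter := outer_fold a b a.length 0 (by omega)
    rw [List.drop_zero] at houter
    rw [hprev0]
    rw [show (a.zipIdx 0) = a.zipIdx from rfl] at houter
    rw [houter]
    unfold rowL
    rw [PySem.List.getD_map_range _ _ _ _ (by omega)]
    unfold Drow
    rw [List.take_length, List.take_length]

lemma cond_eq (s t : String) :
    (levA s.toList t.toList ≤ 2) = (within2 2 s.toList.reverse t.toList.reverse = true) := by
  rw [levA_eq, within2_eq, decide_eq_true_eq]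
  norm_cast

-- ===== VERDICT (by name: the statement is the Claim_ definition above) =====
theorem subdomain_suspicion_spec : Claim_equal_subdomain_suspicion := by
  intro subs tds _hdom
  unfold Spec_subdomain_suspicion subdomain_suspicion subdomain_suspicion_alt
  cases subs with
  | nil => simp
  | cons s l =>
    rw [if_neg (by simp)]
    simp only [cond_eq]
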